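-- pv_equiv track=rewrite | github.com/saagpatel/GithubRepoAuditor | src/action_sync_outcomes.py | _rollback_state
-- ===== SOURCE A (Python) =====
-- from typing import Any
--
-- def _rollback_state(
--     action_rows: list[dict[str, Any]],
--     rollback_runs: list[dict[str, Any]],
--     apply_run_id: str,
-- ) -> str:
--     if any(str(item.get("source_run_id") or "") == apply_run_id and str(item.get("status") or "") not in {"preview", ""} for item in rollback_runs):
--         return "used"
--     if not action_rows:
--         return "not-applicable"
--     states = {str(item.get("rollback_state") or "") for item in action_rows}
--     if not states:
--         return "not-applicable"
--     if states <= {"fully-reversible", "rollback-available"}: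
--         return "ready"
--     if "partial" in states or "fully-reversible" in states or "rollback-available" in states:
--         return "partial"
--     if states <= {"non-reversible"}:
--         return "missing"
--     return "partial"
-- ===== SOURCE B (Python) =====
-- # Per-row local verdicts merged with a semilattice join (equal->keep, mixed->"partial"),
-- # instead of A's global set construction with subset/membership tests.
-- def _classify(state):
--     if state in ("fully-reversible", "rollback-available"):
--         return "ready"
--     if state == "non-reversible":
--         return "missing"
--     return "partial"
--
-- def _rollback_state(action_rows, rollback_runs, apply_run_id):
--     for item in rollback_runs:
--         if str(item.get("source_run_id") or "") == apply_run_id and str(item.get("status") or "") not in ("preview", ""):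
--             return "used"
--     if not action_rows:
--         return "not-applicable"
--     verdict = _classify(str(action_rows[0].get("rollback_state") or ""))
--     for item in action_rows[1:]:
--         if _classify(str(item.get("rollback_state") or "")) != verdict:
--             verdict = "partial"
--     return verdict
-- ===== Notes on version B (the rewrite author's own statement) =====
-- stated objective: alternative
-- what changed: B classifies each row into a local verdict (ready/missing/partial) and merges verdicts with a semilattice join (equal keeps, mixed gives 'partial'), replacing A's set construction with subset/membership tests and its post-classification branch chain.
import Mathlib
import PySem

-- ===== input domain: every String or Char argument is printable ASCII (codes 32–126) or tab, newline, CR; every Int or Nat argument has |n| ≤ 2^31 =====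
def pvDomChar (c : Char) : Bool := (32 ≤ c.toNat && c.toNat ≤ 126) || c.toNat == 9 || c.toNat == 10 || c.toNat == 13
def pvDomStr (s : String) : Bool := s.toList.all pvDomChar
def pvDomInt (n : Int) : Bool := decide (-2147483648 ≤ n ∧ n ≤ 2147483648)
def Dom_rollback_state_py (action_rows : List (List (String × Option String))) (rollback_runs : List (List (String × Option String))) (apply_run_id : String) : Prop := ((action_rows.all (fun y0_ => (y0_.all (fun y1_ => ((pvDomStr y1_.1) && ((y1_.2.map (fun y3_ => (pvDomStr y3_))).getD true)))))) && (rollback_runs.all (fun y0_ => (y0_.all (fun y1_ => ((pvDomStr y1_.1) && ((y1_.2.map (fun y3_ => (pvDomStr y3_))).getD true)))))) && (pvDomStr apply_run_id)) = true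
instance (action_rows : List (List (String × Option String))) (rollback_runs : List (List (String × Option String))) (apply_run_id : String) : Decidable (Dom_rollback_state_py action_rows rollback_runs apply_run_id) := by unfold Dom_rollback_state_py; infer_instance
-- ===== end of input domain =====

-- B maps each row to a local verdict and merges verdicts with a semilattice join
-- (equal keeps the verdict, mixed gives "partial"), replacing A's set/subset classification
-- (objective: alternative; same return value, no side effects).

-- ===== PORT A =====
-- str(item.get(k) or ""): missing key, None value and "" all give ""
def pvGetStr (row : List (String × Option String)) (k : String) : String :=
  match (PySem.Dict.mk row).get? k with
  | some (some s) => s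
  | _ => ""

def rollback_state_py (action_rows : List (List (String × Option String))) (rollback_runs : List (List (String × Option String))) (apply_run_id : String) : String :=
  if rollback_runs.any (fun item =>
      pvGetStr item "source_run_id" == apply_run_id &&
      !(PySem.Set.contains (PySem.Set.ofList ["preview", ""]) (pvGetStr item "status"))) then
    "used"
  else if action_rows = [] then
    "not-applicable"
  else
    let states : PySem.Set String :=
      PySem.Set.ofList (action_rows.map (fun item => pvGetStr item "rollback_state"))
    if states = [] then "not-applicable"
    else if PySem.Set.issubset states (PySem.Set.ofList ["fully-reversible", "rollback-available"]) then "ready"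
    else if PySem.Set.contains states "partial" || PySem.Set.contains states "fully-reversible" ||
            PySem.Set.contains states "rollback-available" then "partial"
    else if PySem.Set.issubset states (PySem.Set.ofList ["non-reversible"]) then "missing"
    else "partial"

-- ===== PORT B =====
-- Source B's _classify
def pvClassify (state : String) : String :=
  if state == "fully-reversible" || state == "rollback-available" then "ready"
  else if state == "non-reversible" then "missing"
  else "partial"

-- the early-return 'for item in rollback_runs' loop of Source B
def pvUsedLoop (rollback_runs : List (List (String × Option String))) (apply_run_id : String) : Bool :=
  match rollback_runs with
  | [] => false
  | item :: rest =>
    if pvGetStr item "source_run_id" == apply_run_id &&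
       !(pvGetStr item "status" == "preview" || pvGetStr item "status" == "") then
      true
    else pvUsedLoop rest apply_run_id

-- Source B's join loop: 'for item in action_rows[1:]: if _classify(...) != verdict: verdict = "partial"'
def pvJoinLoop (verdict : String) (rows : List (List (String × Option String))) : String :=
  match rows with
  | [] => verdict
  | item :: rest =>
    pvJoinLoop (if pvClassify (pvGetStr item "rollback_state") != verdict then "partial" else verdict) rest

def rollback_state_py_alt (action_rows : List (List (String × Option String))) (rollback_runs : List (List (String × Option String))) (apply_run_id : String) : String :=
  if pvUsedLoop rollback_runs apply_run_id then "used"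
  else
    match action_rows with
    | [] => "not-applicable"
    | first :: rest =>
      pvJoinLoop (pvClassify (pvGetStr first "rollback_state")) rest

-- ===== PRECONDITION & SPEC =====
def Spec_rollback_state_py (action_rows : List (List (String × Option String))) (rollback_runs : List (List (String × Option String))) (apply_run_id : String) (out : String) : Prop := out = rollback_state_py_alt action_rows rollback_runs apply_run_id
instance (action_rows : List (List (String × Option String))) (rollback_runs : List (List (String × Option String))) (apply_run_id : String) (out : String) : Decidable (Spec_rollback_state_py action_rows rollback_runs apply_run_id out) := by unfold Spec_rollback_state_py; infer_instance

-- ===== CLAIM (what is proved, stated in full; the proofs are below) =====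
def Claim_equal_rollback_state_py : Prop := ∀ (action_rows : List (List (String × Option String))) (rollback_runs : List (List (String × Option String))) (apply_run_id : String), Dom_rollback_state_py action_rows rollback_runs apply_run_id → Spec_rollback_state_py action_rows rollback_runs apply_run_id (rollback_state_py action_rows rollback_runs apply_run_id)

-- ===== LEMMAS AND PROOFS =====

-- B's early-return loop computes A's any()
theorem pvUsedLoop_eq_any (rollback_runs : List (List (String × Option String))) (apply_run_id : String) :
    pvUsedLoop rollback_runs apply_run_id =
      rollback_runs.any (fun item =>
        pvGetStr item "source_run_id" == apply_run_id &&
        !(PySem.Set.contains (PySem.Set.ofList ["preview", ""]) (pvGetStr item "status"))) := by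
  have hcond : ∀ it : List (String × Option String),
      (pvGetStr it "source_run_id" == apply_run_id &&
        !(PySem.Set.contains (PySem.Set.ofList ["preview", ""]) (pvGetStr it "status"))) =
      (pvGetStr it "source_run_id" == apply_run_id &&
        !(pvGetStr it "status" == "preview" || pvGetStr it "status" == "")) := by
    intro it
    have hlit : (PySem.Set.ofList ["preview", ""] : PySem.Set String) = ["preview", ""] := by decide
    rw [hlit]
    simp only [PySem.Set.contains, List.contains_cons, List.contains_nil, Bool.or_false]
  induction rollback_runs with
  | nil => rfl
  | cons item rest ih =>
    rw [List.any_cons, hcond]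
    simp only [pvUsedLoop, ih]
    cases (pvGetStr item "source_run_id" == apply_run_id &&
        !(pvGetStr item "status" == "preview" || pvGetStr item "status" == ""))
    · simp
    · simp

-- per-string facts about classify
theorem pvClassify_eq_ready (s : String) :
    (pvClassify s == "ready") = (s == "fully-reversible" || s == "rollback-available") := by
  unfold pvClassify
  cases h1 : (s == "fully-reversible" || s == "rollback-available") with
  | true =>
    rw [if_pos rfl]
    decide
  | false =>
    rw [if_neg Bool.false_ne_true]
    split <;> decide

theorem pvClassify_eq_missing (s : String) :
    (pvClassify s == "missing") = (s == "non-reversible") := by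
  unfold pvClassify
  cases h1 : (s == "fully-reversible" || s == "rollback-available") with
  | true =>
    rw [if_pos rfl]
    rcases Bool.or_eq_true_iff.mp h1 with h' | h' <;> rw [eq_of_beq h'] <;> decide
  | false =>
    rw [if_neg Bool.false_ne_true]
    cases h2 : (s == "non-reversible") with
    | true => rw [if_pos rfl]; decide
    | false => rw [if_neg Bool.false_ne_true]; decide

-- the join loop keeps the verdict iff every remaining row classifies to it, else yields "partial"
theorem pvJoinLoop_spec (rows : List (List (String × Option String))) (v : String) :
    pvJoinLoop v rows =
      if rows.all (fun it => pvClassify (pvGetStr it "rollback_state") == v) then v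
      else "partial" := by
  induction rows generalizing v with
  | nil => simp [pvJoinLoop]
  | cons it rest ih =>
    simp only [pvJoinLoop, List.all_cons]
    by_cases hb : pvClassify (pvGetStr it "rollback_state") = v
    · have hbeq : (pvClassify (pvGetStr it "rollback_state") == v) = true := by simp [hb]
      have hbne : (pvClassify (pvGetStr it "rollback_state") != v) = false := by simp [bne, hbeq]
      rw [hbne, if_neg Bool.false_ne_true, ih]
      simp [hbeq]
    · have hbeq : (pvClassify (pvGetStr it "rollback_state") == v) = false := by simp [hb]
      have hbne : (pvClassify (pvGetStr it "rollback_state") != v) = true := by simp [bne, hbeq]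
      rw [hbne, if_pos rfl, ih]
      simp [hbeq]

-- A's subset test over the deduplicated set is all() over the raw list
theorem pv_issubset_ofList (l t : List String) :
    PySem.Set.issubset (PySem.Set.ofList l) t = l.all (fun x => t.contains x) := by
  rw [Bool.eq_iff_iff]
  simp only [PySem.Set.issubset, PySem.Set.contains, List.all_eq_true, PySem.Set.mem_ofList]

-- A's membership test over the deduplicated set is membership in the raw list
theorem pv_contains_ofList (l : List String) (x : String) :
    PySem.Set.contains (PySem.Set.ofList l) x = l.contains x := by
  rw [Bool.eq_iff_iff]
  simp only [PySem.Set.contains, List.contains_iff_mem, PySem.Set.mem_ofList]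

-- a set built from a nonempty list is nonempty
theorem pv_ofList_ne_nil (l : List String) (h : l ≠ []) : PySem.Set.ofList l ≠ [] := by
  obtain ⟨x, xs, rfl⟩ := List.exists_cons_of_ne_nil h
  intro hc
  have : x ∈ PySem.Set.ofList (x :: xs) := (PySem.Set.mem_ofList _ _).mpr (List.mem_cons_self ..)
  rw [hc] at this
  exact (List.not_mem_nil) this

-- the three-membership disjunction is one any()
theorem pv_three_contains (l : List String) :
    (l.contains "partial" || l.contains "fully-reversible" || l.contains "rollback-available") =
      l.any (fun s => s == "partial" || s == "fully-reversible" || s == "rollback-available") := by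
  rw [Bool.eq_iff_iff]
  simp only [Bool.or_eq_true, List.contains_iff_mem, List.any_eq_true, beq_iff_eq]
  constructor
  · rintro ((h | h) | h) <;> exact ⟨_, h, by simp⟩
  · rintro ⟨x, hx, h⟩
    rcases h with (rfl | rfl) | rfl <;> simp [hx]

-- A's branch chain on a nonempty row list equals B's join of per-row verdicts
theorem pv_main (first : List (String × Option String)) (rest : List (List (String × Option String))) :
    (if (first :: rest).all (fun it => pvGetStr it "rollback_state" == "fully-reversible" || pvGetStr it "rollback_state" == "rollback-available") then "ready"
     else if (first :: rest).any (fun it => pvGetStr it "rollback_state" == "partial" || pvGetStr it "rollback_state" == "fully-reversible" || pvGetStr it "rollback_state" == "rollback-available") then "partial"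
     else if (first :: rest).all (fun it => pvGetStr it "rollback_state" == "non-reversible") then "missing"
     else "partial")
    = pvJoinLoop (pvClassify (pvGetStr first "rollback_state")) rest := by
  rw [pvJoinLoop_spec, List.all_cons, List.any_cons, List.all_cons]
  set s0 := pvGetStr first "rollback_state" with hs0
  cases hr : (s0 == "fully-reversible" || s0 == "rollback-available") with
  | true =>
    have hc : pvClassify s0 = "ready" := by unfold pvClassify; rw [hr, if_pos rfl]
    rw [hc, Bool.true_and]
    have hall : (fun it => pvClassify (pvGetStr it "rollback_state") == "ready")
        = (fun it => pvGetStr it "rollback_state" == "fully-reversible" || pvGetStr it "rollback_state" == "rollback-available") :=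
      funext fun it => pvClassify_eq_ready _
    rw [hall]
    cases h2 : rest.all (fun it => pvGetStr it "rollback_state" == "fully-reversible" || pvGetStr it "rollback_state" == "rollback-available") with
    | true => simp
    | false =>
      have hany : (s0 == "partial" || s0 == "fully-reversible" || s0 == "rollback-available") = true := by
        rcases Bool.or_eq_true_iff.mp hr with h' | h' <;> simp [h']
      simp [hany]
  | false =>
    cases hn : (s0 == "non-reversible") with
    | true =>
      have hs : s0 = "non-reversible" := eq_of_beq hn
      have hc : pvClassify s0 = "missing" := by rw [hs]; decide
      have hph : (s0 == "partial" || s0 == "fully-reversible" || s0 == "rollback-available") = false := by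
        rw [hs]; decide
      rw [hc, Bool.false_and, hph, Bool.false_or, Bool.true_and]
      have hall : (fun it => pvClassify (pvGetStr it "rollback_state") == "missing")
          = (fun it => pvGetStr it "rollback_state" == "non-reversible") :=
        funext fun it => pvClassify_eq_missing _
      rw [hall]
      cases hm : rest.all (fun it => pvGetStr it "rollback_state" == "non-reversible") with
      | true =>
        have hnoany : rest.any (fun it => pvGetStr it "rollback_state" == "partial" || pvGetStr it "rollback_state" == "fully-reversible" || pvGetStr it "rollback_state" == "rollback-available") = false := by
          rw [Bool.eq_false_iff]
          intro hany
          obtain ⟨it, hit, hp⟩ := List.any_eq_true.mp hany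
          rw [eq_of_beq (List.all_eq_true.mp hm it hit)] at hp
          exact absurd hp (by decide)
        simp [hnoany]
      | false => simp
    | false =>
      have hc : pvClassify s0 = "partial" := by
        unfold pvClassify
        rw [hr, if_neg Bool.false_ne_true, hn, if_neg Bool.false_ne_true]
      rcases Bool.or_eq_false_iff.mp hr with ⟨h1, h2⟩
      cases hp : (s0 == "partial") with
      | true => simp [hc]
      | false => simp [hc, h1, h2]

-- ===== VERDICT (by name: the statement is the Claim_ definition above) =====
theorem rollback_state_py_spec : Claim_equal_rollback_state_py := by
  intro action_rows rollback_runs apply_run_id _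
  unfold Spec_rollback_state_py rollback_state_py rollback_state_py_alt
  rw [pvUsedLoop_eq_any]
  split
  · rfl
  by_cases he : action_rows = []
  · simp [he]
  obtain ⟨first, rest, rfl⟩ := List.exists_cons_of_ne_nil he
  rw [if_neg he]
  set l := (first :: rest).map (fun item => pvGetStr item "rollback_state") with hl
  have hlne : l ≠ [] := by simp [hl]
  rw [if_neg (pv_ofList_ne_nil l hlne)]
  rw [pv_issubset_ofList, pv_issubset_ofList, pv_contains_ofList, pv_contains_ofList,
      pv_contains_ofList, pv_three_contains]
  have hsub : (PySem.Set.ofList ["fully-reversible", "rollback-available"] : PySem.Set String)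
      = ["fully-reversible", "rollback-available"] := by decide
  have hsub2 : (PySem.Set.ofList ["non-reversible"] : PySem.Set String) = ["non-reversible"] := by decide
  rw [hsub, hsub2]
  simp only [hl, List.all_map, List.any_map, Function.comp_def,
    List.contains_cons, List.contains_nil, Bool.or_false]
  exact pv_main first rest
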